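-- pv_equiv track=rewrite | github.com/PhatDot1/TaskFi-Agent | image_agent/taskfi_agent_fixed.py | extract_ipfs_hash
-- ===== SOURCE A (Python) =====
-- from typing import Optional, List, Dict, Any
--
-- def extract_ipfs_hash(url: str) -> Optional[str]:
--     """Extract IPFS hash from various IPFS URL formats"""
--     if not url:
--         return None
--
--     # Common IPFS URL patterns
--     patterns = [
--         "https://gateway.pinata.cloud/ipfs/",
--         "https://ipfs.io/ipfs/",
--         "https://cloudflare-ipfs.com/ipfs/",
--         "https://dweb.link/ipfs/",
--         "https://gateway.ipfs.io/ipfs/",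
--         "https://ipfs.infura.io/ipfs/",
--     ]
--
--     for pattern in patterns:
--         if url.startswith(pattern):
--             # Extract hash part (everything after the pattern)
--             hash_part = url[len(pattern):]
--             # Remove any additional path components (take only the hash)
--             ipfs_hash = hash_part.split('/')[0].split('?')[0]
--             return ipfs_hash
--
--     return None
-- ===== SOURCE B (Python) =====
-- # B: instead of scanning six full-URL prefixes, locate the first '/ipfs/' marker
-- # and look the host part up in a set.
-- _MARKER = "/ipfs/"
-- _HOSTS = {
--     "https://gateway.pinata.cloud",
--     "https://ipfs.io",
--     "https://cloudflare-ipfs.com",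
--     "https://dweb.link",
--     "https://gateway.ipfs.io",
--     "https://ipfs.infura.io",
-- }
--
-- def _first_seg(s, sep):
--     return s.split(sep)[0]
--
-- def extract_ipfs_hash(url):
--     idx = url.find(_MARKER)
--     if idx == -1:
--         return None
--     if url[:idx] not in _HOSTS:
--         return None
--     rest = url[idx + len(_MARKER):]
--     return _first_seg(_first_seg(rest, '/'), '?')
-- ===== Notes on version B (the rewrite author's own statement) =====
-- stated objective: alternative
-- what changed: B replaces the loop over six full gateway-URL prefixes by one substring search for the ipfs path marker followed by a set lookup of the gateway host part before the marker.
import Mathlib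
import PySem

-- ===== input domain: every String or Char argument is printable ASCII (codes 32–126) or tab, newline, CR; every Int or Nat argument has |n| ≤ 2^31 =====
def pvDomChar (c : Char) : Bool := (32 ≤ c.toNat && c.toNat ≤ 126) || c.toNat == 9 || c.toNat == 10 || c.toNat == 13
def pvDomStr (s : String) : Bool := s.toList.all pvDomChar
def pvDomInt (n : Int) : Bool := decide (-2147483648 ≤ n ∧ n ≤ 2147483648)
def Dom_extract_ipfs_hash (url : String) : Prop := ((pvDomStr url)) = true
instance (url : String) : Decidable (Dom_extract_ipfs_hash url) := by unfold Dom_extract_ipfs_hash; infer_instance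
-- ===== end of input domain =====

-- B replaces A's loop over six full gateway-URL prefixes by one '/ipfs/' marker search plus a set lookup of the host; same results, no speed claim.

-- ===== PORT A =====
def pvPatterns : List String :=
  ["https://gateway.pinata.cloud/ipfs/",
   "https://ipfs.io/ipfs/",
   "https://cloudflare-ipfs.com/ipfs/",
   "https://dweb.link/ipfs/",
   "https://gateway.ipfs.io/ipfs/",
   "https://ipfs.infura.io/ipfs/"]

-- s.split(sep)[0] with a nonempty literal sep: split? returns some of a nonempty list, so getD []/headI is exact here
def pvALoop (url : String) : List String → Option String
  | [] => none
  | p :: ps =>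
    if PySem.Str.startswith url p then
      let hash_part := PySem.Str.slice url (some (p.length : Int)) none
      some (((PySem.Str.split? (((PySem.Str.split? hash_part "/").getD []).headI) "?").getD []).headI)
    else pvALoop url ps

def extract_ipfs_hash (url : String) : Option String :=
  if url = "" then none else pvALoop url pvPatterns

-- ===== PORT B =====
def pvIpfsHosts : PySem.Set String :=
  PySem.Set.ofList
    ["https://gateway.pinata.cloud", "https://ipfs.io", "https://cloudflare-ipfs.com",
     "https://dweb.link", "https://gateway.ipfs.io", "https://ipfs.infura.io"]

-- s.split(sep)[0] with a nonempty literal sep: split? returns some of a nonempty list, so getD []/headI is exact here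
def pvFirstSeg (s : String) (sep : String) : String :=
  ((PySem.Str.split? s sep).getD []).headI

def extract_ipfs_hash_alt (url : String) : Option String :=
  let idx := PySem.Str.find url "/ipfs/"
  if idx = -1 then none
  else if (PySem.Str.slice url none (some idx)) ∈ pvIpfsHosts then
    let rest := PySem.Str.slice url (some (idx + 6)) none
    some (pvFirstSeg (pvFirstSeg rest "/") "?")
  else none

-- ===== PRECONDITION & SPEC =====
def Spec_extract_ipfs_hash (url : String) (out : Option String) : Prop := out = extract_ipfs_hash_alt url
instance (url : String) (out : Option String) : Decidable (Spec_extract_ipfs_hash url out) := by unfold Spec_extract_ipfs_hash; infer_instance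

-- ===== CLAIM (what is proved, stated in full; the proofs are below) =====
def Claim_equal_extract_ipfs_hash : Prop := ∀ (url : String), Dom_extract_ipfs_hash url → Spec_extract_ipfs_hash url (extract_ipfs_hash url)

-- ===== LEMMAS AND PROOFS =====

-- ===== LEMMAS AND PROOFS =====

theorem pv_pfx (m a b : List Char) (h : m <+: a ++ b) (hl : m.length ≤ a.length) : m <+: a := by
  have h2 := List.prefix_iff_eq_take.mp h
  rw [List.take_append_of_le_length hl] at h2
  exact h2 ▸ List.take_prefix m.length a

theorem pv_find_eq (s sub : List Char) (k : Nat)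
    (h1 : sub <+: s.drop k) (h2 : ∀ i < k, ¬ sub <+: s.drop i) :
    PySem.Chars.find s sub = (k : Int) := by
  have hin : sub <:+: s := h1.isInfix.trans (List.drop_suffix k s).isInfix
  have hnn : 0 ≤ PySem.Chars.find s sub := (PySem.Chars.find_nonneg_iff s sub).mpr hin
  obtain ⟨hp, hmin⟩ := PySem.Chars.find_spec hnn
  have hj : (PySem.Chars.find s sub).toNat = k := by
    rcases lt_trichotomy (PySem.Chars.find s sub).toNat k with h | h | h
    · exact absurd hp (h2 _ h)
    · exact h
    · exact absurd h1 (hmin k h)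
  omega

theorem pv_host_pfx (url p host : String) (j : Nat)
    (hx : p.toList = host.toList ++ ('/'::'i'::'p'::'f'::'s'::'/'::[]))
    (htake : url.toList.take j = host.toList)
    (hm : ('/'::'i'::'p'::'f'::'s'::'/'::[]) <+: url.toList.drop j) : p.toList <+: url.toList := by
  obtain ⟨r, hr⟩ := hm
  refine ⟨r, ?_⟩
  calc p.toList ++ r = host.toList ++ (('/'::'i'::'p'::'f'::'s'::'/'::[]) ++ r) := by
        rw [hx, List.append_assoc]
    _ = url.toList.take j ++ url.toList.drop j := by rw [htake, hr]
    _ = url.toList := List.take_append_drop _ _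

theorem pv_match (url p host : String)
    (hx : p.toList = host.toList ++ ('/'::'i'::'p'::'f'::'s'::'/'::[]))
    (hlen : (p.length : Int) = (host.toList.length : Int) + 6)
    (hfind : ∀ i < host.toList.length, ¬ ('/'::'i'::'p'::'f'::'s'::'/'::[]) <+: p.toList.drop i)
    (hmem : host ∈ pvIpfsHosts)
    (hp : PySem.Str.startswith url p = true) :
    extract_ipfs_hash_alt url =
      some (((PySem.Str.split? (((PySem.Str.split? (PySem.Str.slice url (some (p.length : Int)) none) "/").getD []).headI) "?").getD []).headI) := by
  have hpre : p.toList <+: url.toList := by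
    rw [PySem.Str.startswith_eq] at hp
    exact (PySem.Chars.startswith_iff _ _).mp hp
  obtain ⟨t, ht⟩ := hpre
  have hurl : url.toList = host.toList ++ (('/'::'i'::'p'::'f'::'s'::'/'::[]) ++ t) := by
    rw [← ht, hx, List.append_assoc]
  have hplen : p.toList.length = host.toList.length + 6 := by rw [hx]; simp
  have hfs : PySem.Str.find url "/ipfs/" = (host.toList.length : Int) := by
    rw [PySem.Str.find_eq]
    apply pv_find_eq
    · rw [hurl, List.drop_left]
      exact List.prefix_append _ _
    · intro i hi hc
      have hdl : url.toList.drop i = p.toList.drop i ++ t := by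
        rw [← ht, List.drop_append_of_le_length (by omega)]
      rw [hdl] at hc
      exact hfind i hi (pv_pfx _ _ _ hc (by simp only [List.length_drop, List.length_cons, List.length_nil, hplen]; omega))
  have hslice : PySem.Str.slice url none (some ((host.toList.length : Nat) : Int)) = host := by
    apply String.toList_inj.mp
    rw [PySem.Str.toList_slice]
    simp only [PySem.Chars.slice_eq_listSlice, PySem.List.slice_to_natCast]
    rw [hurl, List.take_left]
  have hrest : ((host.toList.length : Nat) : Int) + 6 = (p.length : Int) := by omega
  have hmem' : PySem.Str.slice url none (some ((host.toList.length : Nat) : Int)) ∈ pvIpfsHosts := by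
    rw [hslice]; exact hmem
  simp only [extract_ipfs_hash_alt, hfs]
  rw [if_neg (by omega : ¬ ((host.toList.length : Int) = -1)), if_pos hmem', hrest]
  simp [pvFirstSeg]

theorem pv_nomatch (url : String)
    (h : ∀ p ∈ pvPatterns, ¬ p.toList <+: url.toList) :
    extract_ipfs_hash_alt url = none := by
  by_cases hf : PySem.Str.find url "/ipfs/" = -1
  · simp only [extract_ipfs_hash_alt]
    rw [if_pos hf]
  · have hnn : 0 ≤ PySem.Chars.find url.toList ("/ipfs/" : String).toList := by
      have h0 := PySem.Chars.neg_one_le_find url.toList ("/ipfs/" : String).toList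
      rw [PySem.Str.find_eq] at hf
      omega
    obtain ⟨hp, -⟩ := PySem.Chars.find_spec hnn
    set j := (PySem.Chars.find url.toList ("/ipfs/" : String).toList).toNat with hjdef
    have hm' : ('/'::'i'::'p'::'f'::'s'::'/'::[]) <+: url.toList.drop j := hp
    have hns : (PySem.Str.slice url none (some (PySem.Str.find url "/ipfs/"))) ∉ pvIpfsHosts := by
      intro hmem
      have htake : (PySem.Str.slice url none (some (PySem.Str.find url "/ipfs/"))).toList
          = url.toList.take j := by
        rw [PySem.Str.toList_slice]
        simp only [PySem.Chars.slice_eq_listSlice, PySem.Str.find_eq,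
          PySem.List.slice_to _ hnn]
        rw [← hjdef]
      simp only [pvIpfsHosts, PySem.Set.mem_ofList, List.mem_cons, List.not_mem_nil,
        or_false] at hmem
      rcases hmem with h1 | h1 | h1 | h1 | h1 | h1
      · exact h "https://gateway.pinata.cloud/ipfs/" (by simp [pvPatterns])
          (pv_host_pfx url "https://gateway.pinata.cloud/ipfs/" "https://gateway.pinata.cloud" j (by decide) (by rw [← htake, h1]) hm')
      · exact h "https://ipfs.io/ipfs/" (by simp [pvPatterns])
          (pv_host_pfx url "https://ipfs.io/ipfs/" "https://ipfs.io" j (by decide) (by rw [← htake, h1]) hm')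
      · exact h "https://cloudflare-ipfs.com/ipfs/" (by simp [pvPatterns])
          (pv_host_pfx url "https://cloudflare-ipfs.com/ipfs/" "https://cloudflare-ipfs.com" j (by decide) (by rw [← htake, h1]) hm')
      · exact h "https://dweb.link/ipfs/" (by simp [pvPatterns])
          (pv_host_pfx url "https://dweb.link/ipfs/" "https://dweb.link" j (by decide) (by rw [← htake, h1]) hm')
      · exact h "https://gateway.ipfs.io/ipfs/" (by simp [pvPatterns])
          (pv_host_pfx url "https://gateway.ipfs.io/ipfs/" "https://gateway.ipfs.io" j (by decide) (by rw [← htake, h1]) hm')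
      · exact h "https://ipfs.infura.io/ipfs/" (by simp [pvPatterns])
          (pv_host_pfx url "https://ipfs.infura.io/ipfs/" "https://ipfs.infura.io" j (by decide) (by rw [← htake, h1]) hm')
    simp only [extract_ipfs_hash_alt]
    rw [if_neg hf, if_neg hns]

-- ===== VERDICT (by name: the statement is the Claim_ definition above) =====
theorem extract_ipfs_hash_spec : Claim_equal_extract_ipfs_hash := by
  intro url _
  unfold Spec_extract_ipfs_hash extract_ipfs_hash
  by_cases hu : url = ""
  · subst hu
    rw [if_pos rfl]
    exact (pv_nomatch "" (by decide)).symm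
  rw [if_neg hu]
  by_cases h1 : PySem.Str.startswith url "https://gateway.pinata.cloud/ipfs/" = true
  · simp only [pvPatterns, pvALoop]
    rw [if_pos h1,
      pv_match url "https://gateway.pinata.cloud/ipfs/" "https://gateway.pinata.cloud" (by decide) (by decide) (by decide) (by decide) h1]
  by_cases h2 : PySem.Str.startswith url "https://ipfs.io/ipfs/" = true
  · simp only [pvPatterns, pvALoop]
    rw [if_neg h1, if_pos h2,
      pv_match url "https://ipfs.io/ipfs/" "https://ipfs.io" (by decide) (by decide) (by decide) (by decide) h2]
  by_cases h3 : PySem.Str.startswith url "https://cloudflare-ipfs.com/ipfs/" = true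
  · simp only [pvPatterns, pvALoop]
    rw [if_neg h1, if_neg h2, if_pos h3,
      pv_match url "https://cloudflare-ipfs.com/ipfs/" "https://cloudflare-ipfs.com" (by decide) (by decide) (by decide) (by decide) h3]
  by_cases h4 : PySem.Str.startswith url "https://dweb.link/ipfs/" = true
  · simp only [pvPatterns, pvALoop]
    rw [if_neg h1, if_neg h2, if_neg h3, if_pos h4,
      pv_match url "https://dweb.link/ipfs/" "https://dweb.link" (by decide) (by decide) (by decide) (by decide) h4]
  by_cases h5 : PySem.Str.startswith url "https://gateway.ipfs.io/ipfs/" = true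
  · simp only [pvPatterns, pvALoop]
    rw [if_neg h1, if_neg h2, if_neg h3, if_neg h4, if_pos h5,
      pv_match url "https://gateway.ipfs.io/ipfs/" "https://gateway.ipfs.io" (by decide) (by decide) (by decide) (by decide) h5]
  by_cases h6 : PySem.Str.startswith url "https://ipfs.infura.io/ipfs/" = true
  · simp only [pvPatterns, pvALoop]
    rw [if_neg h1, if_neg h2, if_neg h3, if_neg h4, if_neg h5, if_pos h6,
      pv_match url "https://ipfs.infura.io/ipfs/" "https://ipfs.infura.io" (by decide) (by decide) (by decide) (by decide) h6]
  rw [pv_nomatch url ?_]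
  · simp only [pvPatterns, pvALoop]
    rw [if_neg h1, if_neg h2, if_neg h3, if_neg h4, if_neg h5, if_neg h6]
  · intro p hm hc
    have hc' : PySem.Str.startswith url p = true := by
      rw [PySem.Str.startswith_eq]
      exact (PySem.Chars.startswith_iff _ _).mpr hc
    simp only [pvPatterns, List.mem_cons, List.not_mem_nil, or_false] at hm
    rcases hm with rfl | rfl | rfl | rfl | rfl | rfl
    exacts [h1 hc', h2 hc', h3 hc', h4 hc', h5 hc', h6 hc']
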